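-- pv_equiv track=rewrite | github.com/AnhChangBanKhom/CT292_LyThuyetThongTin | THBuoi2.py | getsuffix
-- ===== SOURCE A (Python) =====
-- def getsuffix(a,b):
--     s = set()
--     for i in a:
--         for j in b:
--             if j.startswith(i) == True and len(i) < len(j):
--                 l = j.split(i,1)
--                 s.add(l[1])
--     for i in b:
--         for j in a:
--             if j.startswith(i) == True and len(i) < len(j):
--                 l = j.split(i,1)
--                 s.add(l[1])
--     return s
-- ===== SOURCE B (Python) =====
-- def getsuffix(a, b):
--     # One-sided matching: bucket candidates by first character so the inner
--     # scan only visits strings that can start with x; emit suffix by slicing.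
--     def half(xs, ys):
--         index = {}
--         for y in ys:
--             index.setdefault(y[:1], []).append(y)
--         out = []
--         for x in xs:
--             n = len(x)
--             for y in index.get(x[:1], ()):
--                 if n < len(y) and y[:n] == x:
--                     out.append(y[n:])
--         return out
--     return set(half(a, b) + half(b, a))
-- ===== Notes on version B (the rewrite author's own statement) =====
-- stated objective: alternative
-- what changed: B builds a first-character bucket index of each list once, so every prefix candidate scans only its own bucket instead of the whole other list, slices the suffix directly instead of split(i,1), and runs one shared helper per direction collecting into a list that is deduplicated at the end.
import Mathlib
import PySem

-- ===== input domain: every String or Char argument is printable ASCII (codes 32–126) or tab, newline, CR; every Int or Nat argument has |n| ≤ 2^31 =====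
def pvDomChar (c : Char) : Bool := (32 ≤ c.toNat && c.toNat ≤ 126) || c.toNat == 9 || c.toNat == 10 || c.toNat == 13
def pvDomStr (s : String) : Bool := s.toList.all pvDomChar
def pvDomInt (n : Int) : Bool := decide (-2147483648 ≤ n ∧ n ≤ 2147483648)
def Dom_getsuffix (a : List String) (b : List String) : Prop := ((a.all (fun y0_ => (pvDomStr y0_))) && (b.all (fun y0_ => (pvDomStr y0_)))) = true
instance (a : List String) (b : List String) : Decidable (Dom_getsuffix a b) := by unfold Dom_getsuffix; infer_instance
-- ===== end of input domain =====

-- B replaces A's full inner scan of the other list by a first-character bucket index built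
-- once per direction, and slices the suffix directly instead of split(i,1).

-- ===== PORT A =====
-- inner loop body of both of A's nested loops (A's code repeats it verbatim):
-- 'if j.startswith(i) == True and len(i) < len(j): l = j.split(i,1); s.add(l[1])'
-- (the 'none' branch is where Python's split('') raises ValueError — excluded by Pre_)
def getsuffixAdd (s : PySem.Set String) (i j : String) : PySem.Set String :=
  if (PySem.Str.startswith j i == true) && decide (PySem.Str.len i < PySem.Str.len j) then
    match (PySem.Str.splitMax? j i 1).bind (fun l => PySem.List.pyGet? l 1) with
    | some v => PySem.Set.add s v
    | none => s
  else s

def getsuffix (a : List String) (b : List String) : List String :=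
  let s : PySem.Set String := PySem.Set.empty
  let s := a.foldl (fun s i => b.foldl (fun s j => getsuffixAdd s i j) s) s
  let s := b.foldl (fun s i => a.foldl (fun s j => getsuffixAdd s i j) s) s
  s

-- ===== PORT B =====
def getsuffixHalf (xs ys : List String) : List String :=
  let index : PySem.Dict String (List String) :=
    ys.foldl (fun d y => d.modify (PySem.Str.slice y none (some 1)) [] (fun l => l ++ [y])) PySem.Dict.empty
  xs.foldl (fun out x =>
    let n : Int := PySem.Str.len x
    (index.getD (PySem.Str.slice x none (some 1)) []).foldl (fun out y =>
      if (decide (n < PySem.Str.len y) && (PySem.Str.slice y none (some n) == x)) = true then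
        out ++ [PySem.Str.slice y (some n) none]
      else out) out) []

def getsuffix_alt (a : List String) (b : List String) : List String :=
  PySem.Set.ofList (getsuffixHalf a b ++ getsuffixHalf b a)

-- ===== PRECONDITION & SPEC =====
-- Pre_ excludes exactly the inputs on which A raises ValueError ('' used as a split
-- separator: one list contains '' while the other contains a nonempty string).
def Pre_getsuffix (a : List String) (b : List String) : Prop :=
  ¬ (("" ∈ a ∧ ∃ y ∈ b, y ≠ "") ∨ ("" ∈ b ∧ ∃ y ∈ a, y ≠ ""))
instance (a : List String) (b : List String) : Decidable (Pre_getsuffix a b) := by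
  unfold Pre_getsuffix; infer_instance

def pvWitness_getsuffix : List String × List String := (["ab", "x"], ["abc", "ab"])

def Spec_getsuffix (a : List String) (b : List String) (out : List String) : Prop := out = getsuffix_alt a b
instance (a : List String) (b : List String) (out : List String) : Decidable (Spec_getsuffix a b out) := by unfold Spec_getsuffix; infer_instance

-- ===== CLAIM (what is proved, stated in full; the proofs are below) =====
def Claim_equal_getsuffix : Prop := ∀ (a : List String) (b : List String), Dom_getsuffix a b → Pre_getsuffix a b → Spec_getsuffix a b (getsuffix a b)

-- ===== LEMMAS AND PROOFS =====

-- the match predicate and the suffix value, shared by both reductions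
def pvPred (x y : String) : Bool :=
  (PySem.Str.startswith y x == true) && decide (PySem.Str.len x < PySem.Str.len y)

def pvSfx (x y : String) : String := PySem.Str.slice y (some (PySem.Str.len x)) none

def pvStream (xs ys : List String) : List String :=
  xs.flatMap (fun x => (ys.filter (pvPred x)).map (pvSfx x))

theorem pv_go0 (sep : List Char) (fuel : Nat) (l' : List Char) (acc : List (List Char)) :
    PySem.Chars.splitOnMax.go sep fuel 0 l' [] acc = (l' :: acc).reverse := by
  cases fuel with
  | zero => simp [PySem.Chars.splitOnMax.go]
  | succ f => cases l' <;> simp [PySem.Chars.splitOnMax.go]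

-- j.split(sep, 1) for a nonempty sep that is a prefix of j: ['', rest]
theorem pv_split_prefix (sep j : List Char) (hne : sep ≠ []) (hp : sep.isPrefixOf j) (hj : j ≠ []) :
    PySem.Chars.splitMax? j sep 1 = some [[], j.drop sep.length] := by
  obtain ⟨c, rest, rfl⟩ : ∃ c rest, j = c :: rest := by
    cases j with | nil => exact absurd rfl hj | cons c r => exact ⟨c, r, rfl⟩
  simp only [PySem.Chars.splitMax?, PySem.Chars.splitOnMax]
  rw [if_neg (by simp [hne]), if_neg (by norm_num)]
  rw [show Int.toNat 1 = 0 + 1 by rfl]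
  rw [show (c :: rest).length + 1 = (rest.length + 1) + 1 by simp]
  rw [show PySem.Chars.splitOnMax.go sep (rest.length + 1 + 1) (0 + 1) (c :: rest) [] []
      = PySem.Chars.splitOnMax.go sep (rest.length + 1) 0 (List.drop sep.length (c :: rest)) [] [[]] by
    simp [PySem.Chars.splitOnMax.go, hp]]
  rw [pv_go0]
  simp

theorem pv_ne_toList (x : String) (hx : x ≠ "") : x.toList ≠ [] := by
  intro hc
  apply hx
  have h2 := congrArg String.ofList hc
  simpa using h2

-- A's loop body is 'if matched, add the suffix' as long as the separator is nonempty
theorem pv_add_eq (s : PySem.Set String) (i j : String) (hi : i ≠ "") :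
    getsuffixAdd s i j = if pvPred i j then PySem.Set.add s (pvSfx i j) else s := by
  unfold getsuffixAdd pvPred
  by_cases h : ((PySem.Str.startswith j i == true) && decide (PySem.Str.len i < PySem.Str.len j)) = true
  · rw [if_pos h, if_pos h]
    have h' := h
    simp only [Bool.and_eq_true, beq_iff_eq, decide_eq_true_eq] at h'
    obtain ⟨hsw, hlt⟩ := h'
    have hine : i.toList ≠ [] := pv_ne_toList i hi
    have hjne : j.toList ≠ [] := by
      intro hc
      have h0 : (0:Int) ≤ PySem.Str.len i := by unfold PySem.Str.len; positivity
      have hl0 : PySem.Str.len j = 0 := by unfold PySem.Str.len; rw [hc]; simp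
      omega
    have hpre : i.toList.isPrefixOf j.toList := by
      rw [List.isPrefixOf_iff_prefix]
      exact (PySem.Chars.startswith_iff _ _).1 (by simpa [PySem.Str.startswith] using hsw)
    rw [show PySem.Str.splitMax? j i 1
        = some [String.ofList [], String.ofList (j.toList.drop i.toList.length)] by
      simp [PySem.Str.splitMax?, pv_split_prefix i.toList j.toList hine hpre hjne]]
    simp only [Option.bind_some]
    rw [show PySem.List.pyGet? [String.ofList [], String.ofList (j.toList.drop i.toList.length)] 1
        = some (String.ofList (j.toList.drop i.toList.length)) by
      rw [show (1:Int) = ((1:Nat):Int) by norm_num, PySem.List.pyGet?_natCast]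
      simp]
    have hsfx : pvSfx i j = String.ofList (j.toList.drop i.toList.length) := by
      simp [pvSfx, PySem.Str.slice, PySem.Str.len, PySem.List.slice_from_natCast]
    rw [hsfx]
  · rw [if_neg h, if_neg h]

-- inner loop of A over ys, for a fixed prefix candidate i
theorem pv_inner (i : String) (ys : List String) (s : PySem.Set String)
    (h : i = "" → ∀ y ∈ ys, y = "") :
    ys.foldl (fun s j => getsuffixAdd s i j) s
      = ((ys.filter (pvPred i)).map (pvSfx i)).foldl PySem.Set.add s := by
  by_cases hi : i = ""
  · subst hi
    have hy := h rfl
    rw [PySem.List.foldl_congr_mem ys _ (fun s _ => s) s ?_]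
    · rw [PySem.List.foldl_ignore]
      have hfil : ys.filter (pvPred "") = [] := by
        rw [List.filter_eq_nil_iff]
        intro y hyy
        rw [hy y hyy]
        decide
      rw [hfil]
      simp
    · intro acc x hx
      rw [hy x hx]
      unfold getsuffixAdd
      rw [if_neg (by decide)]
  · rw [PySem.List.foldl_congr_mem ys _
        (fun s j => if pvPred i j then PySem.Set.add s (pvSfx i j) else s) s
        (fun acc x _ => pv_add_eq acc i x hi)]
    rw [PySem.List.foldl_if_eq_foldl_filter (pvPred i) (fun s j => PySem.Set.add s (pvSfx i j))]
    exact (List.foldl_map).symm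

-- both of A's nested loops, reduced to a fold of Set.add over the matched-suffix stream
theorem pv_outer (xs ys : List String) (s : PySem.Set String)
    (h : "" ∈ xs → ∀ y ∈ ys, y = "") :
    xs.foldl (fun s i => ys.foldl (fun s j => getsuffixAdd s i j) s) s
      = (pvStream xs ys).foldl PySem.Set.add s := by
  induction xs generalizing s with
  | nil => simp [pvStream]
  | cons x xt ih =>
    rw [List.foldl_cons]
    rw [pv_inner x ys s (fun hx => h (by simp [hx]))]
    rw [ih _ (fun hx => h (List.mem_cons_of_mem _ hx))]
    simp [pvStream, List.foldl_append]

-- B's first-character index: the bucket of c holds exactly ys filtered to key = c, in order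
theorem pv_bucket (ys : List String) (c : String) :
    (ys.foldl (fun d y => d.modify (PySem.Str.slice y none (some 1)) [] (fun l => l ++ [y]))
        PySem.Dict.empty).getD c []
      = ys.filter (fun y => PySem.Str.slice y none (some 1) == c) := by
  rw [show ys.foldl (fun d y => d.modify (PySem.Str.slice y none (some 1)) [] (fun l => l ++ [y]))
        PySem.Dict.empty
      = (ys.map (fun y => (PySem.Str.slice y none (some 1), y))).foldl
          (fun d p => d.modify p.1 [] (fun l => l ++ [p.2])) PySem.Dict.empty by
    rw [List.foldl_map]]
  rw [PySem.Dict.getD_foldl_modify_append]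
  simp [List.filter_map, Function.comp_def]

-- B's slice test equals A's startswith test
theorem pv_pred_eq (x y : String) :
    (decide (PySem.Str.len x < PySem.Str.len y)
      && (PySem.Str.slice y none (some (PySem.Str.len x)) == x)) = pvPred x y := by
  unfold pvPred
  by_cases hlt : PySem.Str.len x < PySem.Str.len y
  · rw [decide_eq_true hlt, Bool.true_and, Bool.and_true]
    have hsl : PySem.Str.slice y none (some (PySem.Str.len x))
        = String.ofList (y.toList.take x.toList.length) := by
      simp [PySem.Str.slice, PySem.Str.len, PySem.List.slice_to_natCast]
    rw [hsl, Bool.eq_iff_iff, beq_iff_eq, beq_iff_eq]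
    unfold PySem.Str.startswith
    rw [PySem.Chars.startswith_iff, List.prefix_iff_eq_take]
    constructor
    · intro hq
      rw [← hq]
      simp
    · intro hq
      rw [← hq]
      simp
  · rw [decide_eq_false hlt]
    simp

-- a matched y lies in x's first-character bucket
theorem pv_key (x y : String) (hx : x ≠ "") (hp : pvPred x y = true) :
    (PySem.Str.slice y none (some 1) == PySem.Str.slice x none (some 1)) = true := by
  simp only [pvPred, Bool.and_eq_true, beq_iff_eq, decide_eq_true_eq] at hp
  obtain ⟨hsw, _⟩ := hp
  have hpre : x.toList <+: y.toList := (PySem.Chars.startswith_iff _ _).1 hsw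
  have hxne : x.toList ≠ [] := pv_ne_toList x hx
  have htake : y.toList.take 1 = x.toList.take 1 := by
    obtain ⟨t, ht⟩ := hpre
    obtain ⟨c, r, hcr⟩ : ∃ c r, x.toList = c :: r := by
      rcases hxl : x.toList with _ | ⟨c, r⟩
      · exact absurd hxl hxne
      · exact ⟨c, r, rfl⟩
    rw [← ht, hcr]
    simp
  have hsly : PySem.Str.slice y none (some 1) = String.ofList (y.toList.take 1) := by
    unfold PySem.Str.slice
    rw [show (1:Int) = ((1:Nat):Int) by norm_num]
    rw [PySem.Chars.slice_eq_listSlice, PySem.List.slice_to_natCast]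
  have hslx : PySem.Str.slice x none (some 1) = String.ofList (x.toList.take 1) := by
    unfold PySem.Str.slice
    rw [show (1:Int) = ((1:Nat):Int) by norm_num]
    rw [PySem.Chars.slice_eq_listSlice, PySem.List.slice_to_natCast]
  rw [hsly, hslx, htake]
  simp

-- B's half-pass equals the matched-suffix stream
theorem pv_half (xs ys : List String) (h : "" ∈ xs → ∀ y ∈ ys, y = "") :
    getsuffixHalf xs ys = pvStream xs ys := by
  unfold getsuffixHalf
  rw [PySem.List.foldl_congr_mem xs _
      (fun out x => out ++ (ys.filter (pvPred x)).map (pvSfx x)) [] ?_]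
  · rw [PySem.List.foldl_append_eq_flatMap]
    simp [pvStream]
  · intro acc x hx
    simp only []
    rw [pv_bucket ys (PySem.Str.slice x none (some 1))]
    rw [PySem.List.foldl_append_if]
    rw [List.filter_filter]
    rw [show (fun y => PySem.Str.slice y (some (PySem.Str.len x)) none) = pvSfx x from rfl]
    congr 1
    congr 1
    apply List.filter_congr
    intro y hyy
    rw [pv_pred_eq x y]
    by_cases hp : pvPred x y = true
    · rw [hp, Bool.true_and]
      by_cases hx0 : x = ""
      · subst hx0
        have hy := h (by simpa using hx) y hyy
        rw [hy] at hp
        exact absurd hp (by decide)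
      · exact pv_key x y hx0 hp
    · rw [Bool.not_eq_true] at hp
      rw [hp, Bool.false_and]

-- ===== VERDICT (by name: the statement is the Claim_ definition above) =====
theorem getsuffix_spec : Claim_equal_getsuffix := by
  intro a b _ hpre
  unfold Pre_getsuffix at hpre
  push_neg at hpre
  obtain ⟨h1, h2⟩ := hpre
  have hab : "" ∈ a → ∀ y ∈ b, y = "" := fun ha y hy => by
    by_contra hne
    exact hne (h1 ha y hy)
  have hba : "" ∈ b → ∀ y ∈ a, y = "" := fun hb y hy => by
    by_contra hne
    exact hne (h2 hb y hy)
  show getsuffix a b = getsuffix_alt a b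
  have hA : getsuffix a b
      = List.foldl PySem.Set.add
          (List.foldl PySem.Set.add PySem.Set.empty (pvStream a b)) (pvStream b a) := by
    show List.foldl (fun s i => List.foldl (fun s j => getsuffixAdd s i j) s a)
        (List.foldl (fun s i => List.foldl (fun s j => getsuffixAdd s i j) s b)
          PySem.Set.empty a) b = _
    rw [pv_outer a b PySem.Set.empty hab, pv_outer b a _ hba]
  rw [hA]
  unfold getsuffix_alt
  rw [pv_half a b hab, pv_half b a hba, PySem.Set.ofList_eq_foldl, List.foldl_append]
  rfl
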